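-- pv_equiv track=rewrite | github.com/SashaPasha280kgtyaga/Task-3 | Task3Screenshot_2.py | replace_multiple_question_marks_and_exclamations
-- ===== SOURCE A (Python) =====
-- def replace_multiple_question_marks_and_exclamations(input_str):
--     input_str = input_str.rstrip()
--     last_non_whitespace_index = len(input_str) - 1
--     while last_non_whitespace_index >= 0 and input_str[last_non_whitespace_index].isspace():
--         last_non_whitespace_index -= 1
--     if last_non_whitespace_index >= 0:
--         last_char = input_str[last_non_whitespace_index]
--         if last_char == '?' or last_char == '!':
--             count = 1
--             for i in range(last_non_whitespace_index - 1, -1, -1):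
--                 if input_str[i] == last_char:
--                     count += 1
--                 else:
--                     break
--             input_str = input_str[:last_non_whitespace_index - count + 1] + last_char
--     return input_str
-- ===== SOURCE B (Python) =====
-- def replace_multiple_question_marks_and_exclamations(input_str):
--     s = input_str.rstrip()
--     run_start = 0
--     for i in range(1, len(s)):
--         if s[i] != s[i - 1]:
--             run_start = i
--     if s and s[run_start] in '?!':
--         return s[:run_start + 1]
--     return s
-- ===== Notes on version B (the rewrite author's own statement) =====
-- stated objective: alternative
-- what changed: Replaces A's backward index scan with whitespace re-check and run-length counting by a single forward pass that tracks the start index of the last character run, then truncates the string right after that start if the run character is '?' or '!'.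
import Mathlib
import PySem

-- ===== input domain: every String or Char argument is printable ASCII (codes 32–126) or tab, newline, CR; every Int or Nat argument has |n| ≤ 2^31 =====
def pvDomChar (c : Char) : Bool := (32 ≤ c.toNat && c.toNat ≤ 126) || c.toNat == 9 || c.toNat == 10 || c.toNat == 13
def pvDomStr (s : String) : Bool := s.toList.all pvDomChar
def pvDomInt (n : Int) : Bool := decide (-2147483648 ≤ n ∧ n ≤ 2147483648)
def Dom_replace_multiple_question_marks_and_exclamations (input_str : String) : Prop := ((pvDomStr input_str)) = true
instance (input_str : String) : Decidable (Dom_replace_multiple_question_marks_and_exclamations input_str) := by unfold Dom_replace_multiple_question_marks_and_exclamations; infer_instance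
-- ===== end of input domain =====

-- B replaces A's backward index scan (with whitespace re-check and run-length counting) by a
-- single FORWARD pass that tracks the start index of the last character run, then truncates
-- right after that start if the run character is '?' or '!' (objective: alternative).

-- ===== PORT A =====
-- while last_non_whitespace_index >= 0 and input_str[last_non_whitespace_index].isspace(): … -= 1
def pvWsA (cs : List Char) (i : Int) : Int :=
  if h : 0 ≤ i ∧ PySem.Chars.strIsspace [PySem.List.pyGetD cs i ' '] = true
  then pvWsA cs (i - 1) else i
termination_by (i + 1).toNat
decreasing_by omega

-- count = 1; for i in range(last_non_whitespace_index - 1, -1, -1): if input_str[i] == last_char: count += 1 else: break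
def pvCntA (cs : List Char) (c : Char) (i : Int) (count : Int) : Int :=
  if h : 0 ≤ i then
    if PySem.List.pyGetD cs i ' ' == c then pvCntA cs c (i - 1) (count + 1) else count
  else count
termination_by (i + 1).toNat
decreasing_by omega

-- the body of A after input_str = input_str.rstrip(), on the character list
def pvBodyA (cs : List Char) : List Char :=
  let last := pvWsA cs ((cs.length : Int) - 1)
  if 0 ≤ last then
    let c := PySem.List.pyGetD cs last ' '
    if c == '?' || c == '!' then
      let count := pvCntA cs c (last - 1) 1
      PySem.List.slice cs none (some (last - count + 1)) ++ [c]
    else cs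
  else cs

def replace_multiple_question_marks_and_exclamations (input_str : String) : String :=
  String.ofList (pvBodyA (PySem.Chars.rstrip input_str.toList))

-- ===== PORT B =====
-- run_start = 0; for i in range(1, len(s)): if s[i] != s[i-1]: run_start = i
def pvRunStart (cs : List Char) : Int :=
  (PySem.List.pyRange 1 (cs.length : Int) 1).foldl
    (fun acc i =>
      if PySem.List.pyGetD cs i ' ' != PySem.List.pyGetD cs (i - 1) ' ' then i else acc) 0

-- if s and s[run_start] in '?!': return s[:run_start + 1]; return s
def pvBodyB (cs : List Char) : List Char :=
  let r := pvRunStart cs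
  if !cs.isEmpty &&
     (PySem.List.pyGetD cs r ' ' == '?' || PySem.List.pyGetD cs r ' ' == '!') then
    PySem.List.slice cs none (some (r + 1))
  else cs

def replace_multiple_question_marks_and_exclamations_alt (input_str : String) : String :=
  String.ofList (pvBodyB (PySem.Chars.rstrip input_str.toList))

-- ===== PRECONDITION & SPEC =====
def Spec_replace_multiple_question_marks_and_exclamations (input_str : String) (out : String) : Prop := out = replace_multiple_question_marks_and_exclamations_alt input_str
instance (input_str : String) (out : String) : Decidable (Spec_replace_multiple_question_marks_and_exclamations input_str out) := by unfold Spec_replace_multiple_question_marks_and_exclamations; infer_instance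

-- ===== CLAIM (what is proved, stated in full; the proofs are below) =====
def Claim_equal_replace_multiple_question_marks_and_exclamations : Prop := ∀ (input_str : String), Dom_replace_multiple_question_marks_and_exclamations input_str → Spec_replace_multiple_question_marks_and_exclamations input_str (replace_multiple_question_marks_and_exclamations input_str)

-- ===== LEMMAS AND PROOFS =====

-- after rstrip, the last character (if any) is not Python-whitespace
theorem pv_rstrip_last_not_space (l : List Char) (h : PySem.Chars.rstrip l ≠ []) :
    PySem.Chars.isspace ((PySem.Chars.rstrip l).getLast h) = false := by
  unfold PySem.Chars.rstrip at *
  have hd : List.dropWhile PySem.Chars.isspace l.reverse ≠ [] := by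
    intro he; exact h (by simp [he])
  rw [List.getLast_reverse]
  exact List.head_dropWhile_not _ hd

-- the counting loop of A over u ++ replicate k c, starting m characters into the run
theorem pv_cnt_spec (u : List Char) (c : Char) (k : Nat)
    (hu : ∀ h : u ≠ [], u.getLast h ≠ c) :
    ∀ m : Nat, m ≤ k → ∀ n : Int,
      pvCntA (u ++ List.replicate k c) c ((u.length : Int) + m - 1) n = n + m := by
  intro m
  induction m with
  | zero =>
    intro _ n
    simp only [Nat.cast_zero, add_zero]
    rcases List.eq_nil_or_concat u with hnil | ⟨v, a, hva⟩
    · subst hnil; rw [pvCntA]; simp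
    · have hul : u.length = v.length + 1 := by subst hva; simp
      rw [pvCntA]
      have hlen : (0:Int) ≤ (u.length : Int) - 1 := by omega
      rw [dif_pos hlen]
      have hlt : (u.length : Int) - 1 < ((u ++ List.replicate k c).length : Int) := by
        simp only [List.length_append, List.length_replicate]; push_cast; omega
      rw [PySem.List.pyGetD_eq_getElem _ _ hlen hlt]
      have hun : u ≠ [] := by subst hva; simp
      have hidx : ((u.length : Int) - 1).toNat = u.length - 1 := by omega
      have hget : (u ++ List.replicate k c)[((u.length : Int) - 1).toNat]'(by
            simp [hidx]; omega) = u.getLast hun := by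
        rw [List.getLast_eq_getElem]
        have hb : u.length - 1 < u.length := by omega
        rw [List.getElem_append_left (by rw [hidx]; omega)]
        congr 1
      rw [hget]
      have : (u.getLast hun == c) = false := by
        simp only [beq_eq_false_iff_ne]; exact hu hun
      rw [this]; simp
  | succ m ih =>
    intro hm n
    rw [pvCntA]
    have h0 : (0:Int) ≤ (u.length : Int) + (m + 1 : Nat) - 1 := by push_cast; omega
    rw [dif_pos h0]
    have hlt : (u.length : Int) + (m + 1 : Nat) - 1 < ((u ++ List.replicate k c).length : Int) := by
      simp only [List.length_append, List.length_replicate]; push_cast; omega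
    rw [PySem.List.pyGetD_eq_getElem _ _ h0 hlt]
    have hidx : ((u.length : Int) + (m + 1 : Nat) - 1).toNat = u.length + m := by
      push_cast; omega
    have hget : (u ++ List.replicate k c)[((u.length : Int) + (m + 1 : Nat) - 1).toNat]'(by
          rw [hidx]; simp only [List.length_append, List.length_replicate]; omega) = c := by
      simp only [hidx]
      rw [List.getElem_append_right (by omega)]
      simp
    rw [hget]
    simp only [BEq.rfl, if_true]
    have harg : (u.length : Int) + (m + 1 : Nat) - 1 - 1 = (u.length : Int) + m - 1 := by
      push_cast; ring
    rw [harg, ih (by omega) (n + 1)]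
    push_cast; ring

-- the whitespace loop of A returns its start index when the last character is not whitespace
theorem pv_ws_spec (cs : List Char) (h : cs ≠ [])
    (hsp : PySem.Chars.isspace (cs.getLast h) = false) :
    pvWsA cs ((cs.length : Int) - 1) = (cs.length : Int) - 1 := by
  rw [pvWsA]
  have hlen := List.length_pos_of_ne_nil h
  have h0 : (0:Int) ≤ (cs.length : Int) - 1 := by omega
  have hlt : (cs.length : Int) - 1 < (cs.length : Int) := by omega
  rw [dif_neg]
  intro ⟨_, hss⟩
  rw [PySem.List.pyGetD_eq_getElem _ _ h0 hlt] at hss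
  have hidx : ((cs.length : Int) - 1).toNat = cs.length - 1 := by omega
  have : cs[((cs.length : Int) - 1).toNat]'(by omega) = cs.getLast h := by
    rw [List.getLast_eq_getElem]; congr 1
  rw [this] at hss
  simp [PySem.Chars.strIsspace, hsp] at hss

-- decomposition: a nonempty list is u ++ replicate k (last char), k ≥ 1, last of u ≠ that char
theorem pv_decomp (cs : List Char) (h : cs ≠ []) :
    ∃ (u : List Char) (k : Nat), cs = u ++ List.replicate k (cs.getLast h) ∧ 1 ≤ k ∧
      (∀ hu : u ≠ [], u.getLast hu ≠ cs.getLast h) := by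
  set c := cs.getLast h with hc
  refine ⟨(cs.reverse.dropWhile (· == c)).reverse, (cs.reverse.takeWhile (· == c)).length, ?_, ?_, ?_⟩
  · have hrep : cs.reverse.takeWhile (· == c) =
        List.replicate (cs.reverse.takeWhile (· == c)).length c := by
      apply List.eq_replicate_of_mem
      intro b hb
      have := List.mem_takeWhile_imp hb
      simpa using this
    conv_lhs => rw [← cs.reverse_reverse, ← List.takeWhile_append_dropWhile (p := (· == c)) (l := cs.reverse)]
    rw [List.reverse_append, hrep]
    simp
  · have hr : cs.reverse ≠ [] := by simp [h]
    cases he : cs.reverse with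
    | nil => exact absurd he hr
    | cons x t =>
      have hx : x = c := by
        have h2 : cs.getLast? = some x := by
          have h4 := List.getLast?_reverse (l := cs.reverse)
          rw [List.reverse_reverse] at h4
          rw [h4, he]; rfl
        have h3 := List.getLast?_eq_some_getLast (l := cs) h
        rw [h3] at h2
        exact (Option.some.inj h2).symm
      rw [List.takeWhile_cons]
      simp [hx]
  · intro hu hl
    have hdn : cs.reverse.dropWhile (· == c) ≠ [] := by
      intro he; apply hu; rw [he]; rfl
    have hhd := List.head_dropWhile_not (fun x => x == c) hdn
    rw [List.getLast_reverse] at hl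
    rw [hl] at hhd
    simp at hhd

-- a fold whose step never fires keeps its accumulator
theorem pv_foldl_keep (p : Int → Bool) (l : List Int) (acc : Int)
    (h : ∀ i ∈ l, p i = false) :
    l.foldl (fun a i => if p i then i else a) acc = acc := by
  induction l generalizing acc with
  | nil => rfl
  | cons x t ih =>
    simp only [List.foldl_cons, h x (List.mem_cons_self ..)]
    exact ih acc (fun i hi => h i (List.mem_cons_of_mem _ hi))

-- any admissible index at or past u.length reads the run character c
theorem pv_get_run (u : List Char) (c : Char) (k : Nat) (i : Int)
    (h1 : (u.length : Int) ≤ i) (h2 : i < ((u ++ List.replicate k c).length : Int)) :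
    PySem.List.pyGetD (u ++ List.replicate k c) i ' ' = c := by
  have h0 : (0:Int) ≤ i := by omega
  rw [PySem.List.pyGetD_eq_getElem _ _ h0 h2]
  simp only [List.length_append, List.length_replicate] at h2
  rw [List.getElem_append_right (by omega)]
  simp

-- the forward run-start scan of B finds the start of the trailing run
theorem pv_runstart_eq (u : List Char) (c : Char) (k : Nat) (hk : 1 ≤ k)
    (hu : ∀ h : u ≠ [], u.getLast h ≠ c) :
    pvRunStart (u ++ List.replicate k c) = (u.length : Int) := by
  have hlen : (u ++ List.replicate k c).length = u.length + k := by simp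
  unfold pvRunStart
  rw [PySem.List.pyRange_one_append 1 ((u.length : Int) + 1) ((u ++ List.replicate k c).length : Int)
      (by omega) (by rw [hlen]; push_cast; omega)]
  rw [List.foldl_append]
  have hfirst : (PySem.List.pyRange 1 ((u.length : Int) + 1) 1).foldl
      (fun acc i =>
        if PySem.List.pyGetD (u ++ List.replicate k c) i ' ' !=
           PySem.List.pyGetD (u ++ List.replicate k c) (i - 1) ' ' then i else acc) 0
      = (u.length : Int) := by
    rcases List.eq_nil_or_concat u with hnil | ⟨v, a, hva⟩
    · rw [hnil]
      simp [PySem.List.pyRange_one_eq_nil]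
    · have hupos : 1 ≤ u.length := by subst hva; simp
      rw [PySem.List.pyRange_one_succ_right (show (1:Int) ≤ (u.length : Int) by omega)]
      rw [List.foldl_append]
      simp only [List.foldl_cons, List.foldl_nil]
      have hun : u ≠ [] := by subst hva; simp
      have hgl : PySem.List.pyGetD (u ++ List.replicate k c) ((u.length : Int) - 1) ' '
          = u.getLast hun := by
        have h0 : (0:Int) ≤ (u.length : Int) - 1 := by omega
        have hlt : (u.length : Int) - 1 < ((u ++ List.replicate k c).length : Int) := by
          rw [hlen]; push_cast; omega
        rw [PySem.List.pyGetD_eq_getElem _ _ h0 hlt]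
        rw [List.getLast_eq_getElem]
        rw [List.getElem_append_left (by omega)]
        congr 1
        omega
      have hgc : PySem.List.pyGetD (u ++ List.replicate k c) (u.length : Int) ' ' = c :=
        pv_get_run u c k _ (by omega) (by rw [hlen]; push_cast; omega)
      rw [hgc, hgl]
      have : (c != u.getLast hun) = true := by
        simp only [bne_iff_ne, ne_eq]
        exact fun he => hu hun he.symm
      rw [this]
      simp
  rw [hfirst]
  apply pv_foldl_keep
  intro i hi
  rw [PySem.List.mem_pyRange_one] at hi
  have h1 : PySem.List.pyGetD (u ++ List.replicate k c) i ' ' = c :=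
    pv_get_run u c k i (by omega) hi.2
  have h2 : PySem.List.pyGetD (u ++ List.replicate k c) (i - 1) ' ' = c :=
    pv_get_run u c k (i - 1) (by omega) (by omega)
  simp [h1, h2]

-- core equivalence on the rstripped character list
theorem pv_body_eq (cs : List Char)
    (hsp : ∀ h : cs ≠ [], PySem.Chars.isspace (cs.getLast h) = false) :
    pvBodyA cs = pvBodyB cs := by
  by_cases h : cs = []
  · subst h
    unfold pvBodyA pvBodyB pvRunStart
    rw [pvWsA]
    simp
  · obtain ⟨u, k, hdec, hk, hu⟩ := pv_decomp cs h
    set c := cs.getLast h with hc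
    have hlenpos := List.length_pos_of_ne_nil h
    have hlen : cs.length = u.length + k := by rw [hdec]; simp
    have hws := pv_ws_spec cs h (hsp h)
    have hgetlast : PySem.List.pyGetD cs ((cs.length : Int) - 1) ' ' = c := by
      rw [PySem.List.pyGetD_eq_getElem _ _ (by omega) (by omega)]
      rw [hc, List.getLast_eq_getElem]; congr 1; omega
    have hrs : pvRunStart cs = (u.length : Int) := by
      rw [hdec]; exact pv_runstart_eq u c k hk hu
    have hgr : PySem.List.pyGetD cs (u.length : Int) ' ' = c := by
      rw [hdec]
      exact pv_get_run u c k _ (by omega) (by rw [← hdec]; omega)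
    have hne : cs.isEmpty = false := by simp [h]
    unfold pvBodyA pvBodyB
    simp only [hws, hgetlast, hrs, hgr, hne, Bool.not_false, Bool.true_and]
    rw [if_pos (show (0:Int) ≤ (cs.length : Int) - 1 by omega)]
    by_cases hqc : (c == '?' || c == '!') = true
    · rw [if_pos hqc, if_pos hqc]
      -- count = k on the A side
      have hcnt : pvCntA cs c ((cs.length : Int) - 1 - 1) 1 = (k : Int) := by
        have := pv_cnt_spec u c k hu (k - 1) (by omega) 1
        rw [← hdec] at this
        have harg : (u.length : Int) + ((k : Nat) - 1 : Nat) - 1 = (cs.length : Int) - 1 - 1 := by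
          rw [hlen]; push_cast [Nat.cast_sub hk]; ring
        rw [harg] at this
        rw [this]; push_cast [Nat.cast_sub hk]; ring
      rw [hcnt]
      have hsliceA : (cs.length : Int) - 1 - (k : Int) + 1 = ((u.length : Nat) : Int) := by
        rw [hlen]; push_cast; ring
      rw [hsliceA, PySem.List.slice_to_natCast]
      have hsliceB : ((u.length : Nat) : Int) + 1 = ((u.length + 1 : Nat) : Int) := by push_cast; ring
      rw [hsliceB, PySem.List.slice_to_natCast]
      have htakeA : List.take u.length cs = u := by rw [hdec]; simp
      have htakeB : List.take (u.length + 1) cs = u ++ [c] := by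
        rw [hdec, List.take_append]
        simp [List.take_replicate, Nat.min_eq_left hk]
      rw [htakeA, htakeB]
    · rw [if_neg hqc, if_neg hqc]

-- ===== VERDICT (by name: the statement is the Claim_ definition above) =====
theorem replace_multiple_question_marks_and_exclamations_spec : Claim_equal_replace_multiple_question_marks_and_exclamations := by
  intro input_str _
  unfold Spec_replace_multiple_question_marks_and_exclamations
  unfold replace_multiple_question_marks_and_exclamations replace_multiple_question_marks_and_exclamations_alt
  rw [pv_body_eq _ (pv_rstrip_last_not_space input_str.toList)]
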